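-- pv_equiv track=rewrite | github.com/pypi-data/pypi-mirror-397 | packages/sshow/sshow-0.1.0-py3-none-any.whl/sshow.py | highlight_bg
-- ===== SOURCE A (Python) =====
-- from typing import Dict, List, Optional
--
-- def highlight_bg(text: str, keyword_lower: Optional[str]) -> str:
--     if not keyword_lower:
--         return text
--     kw = keyword_lower
--     lower = text.lower()
--     start = 0
--     parts: List[str] = []
--     while True:
--         idx = lower.find(kw, start)
--         if idx == -1:
--             parts.append(text[start:])
--             break
--         if idx > start:
--             parts.append(text[start:idx])
--         end = idx + len(kw)
--         match = text[idx:end]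
--         parts.append(f"\033[42m{match}\033[0m")
--         start = end
--     return "".join(parts)
-- ===== SOURCE B (Python) =====
-- def highlight_bg(text, keyword_lower):
--     if not keyword_lower:
--         return text
--     kw = keyword_lower
--     lower = text.lower()
--     k = len(kw)
--     out = []
--     i = 0
--     while i < len(text):
--         if lower[i:i+k] == kw:
--             out.append(f"\033[42m{text[i:i+k]}\033[0m")
--             i += k
--         else:
--             out.append(text[i])
--             i += 1
--     return "".join(out)
-- ===== Notes on version B (the rewrite author's own statement) =====
-- stated objective: alternative
-- what changed: Replaces the repeated str.find scan with slice extraction between matches by a single left-to-right cursor pass that tests a keyword match at each position and emits one character or one highlighted match per step.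
import Mathlib
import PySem

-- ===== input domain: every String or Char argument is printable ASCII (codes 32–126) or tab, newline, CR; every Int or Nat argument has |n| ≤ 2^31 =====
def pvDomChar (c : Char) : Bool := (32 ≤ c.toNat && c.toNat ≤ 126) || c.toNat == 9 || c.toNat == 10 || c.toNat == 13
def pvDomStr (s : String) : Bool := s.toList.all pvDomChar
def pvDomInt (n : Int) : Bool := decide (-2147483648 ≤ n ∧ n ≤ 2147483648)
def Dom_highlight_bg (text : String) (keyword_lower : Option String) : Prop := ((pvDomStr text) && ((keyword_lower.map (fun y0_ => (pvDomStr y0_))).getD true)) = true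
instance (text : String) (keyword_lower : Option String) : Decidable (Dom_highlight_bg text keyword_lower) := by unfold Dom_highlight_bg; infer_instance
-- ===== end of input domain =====

-- B replaces A's repeated str.find + slice-between-matches loop by a single cursor pass that
-- tests for a keyword match at each position and emits one char or one highlighted match per step
-- (alternative decomposition, same exact output).

-- the ANSI wrapper "\033[42m" ++ match ++ "\033[0m" (shared literal of both Pythons)
def pvAnsi (m : List Char) : List Char :=
  '\x1b' :: '[' :: '4' :: '2' :: 'm' :: (m ++ ['\x1b', '[', '0', 'm'])

-- ===== PORT A =====
-- A's while-loop: repeated lower.find(kw, start); fuel (length+1) bounds the iterations, never reached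
def highlightLoopA (text lower kw : List Char) (fuel start : Nat) (parts : List (List Char)) : List (List Char) :=
  match fuel with
  | 0 => parts.reverse
  | fuel + 1 =>
    let idx := PySem.Chars.findFrom lower kw (start : Int)
    if idx = -1 then
      (PySem.Chars.slice text (some (start : Int)) none :: parts).reverse
    else
      let parts2 := if (start : Int) < idx then PySem.Chars.slice text (some (start : Int)) (some idx) :: parts else parts
      let e : Nat := idx.toNat + kw.length
      highlightLoopA text lower kw fuel e (pvAnsi (PySem.Chars.slice text (some idx) (some (e : Int))) :: parts2)

def highlight_bg (text : String) (keyword_lower : Option String) : String :=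
  match keyword_lower with
  | none => text
  | some kw =>
    if kw = "" then text
    else
      let t := text.toList
      let lower := PySem.Chars.lower t
      String.ofList (PySem.Chars.join [] (highlightLoopA t lower kw.toList (t.length + 1) 0 []))

-- ===== PORT B =====
-- B's while-loop: cursor i, compare lower[i:i+k] with kw, emit one char or one highlighted match
def highlightLoopB (text lower kw : List Char) (fuel i : Nat) (out : List (List Char)) : List (List Char) :=
  match fuel with
  | 0 => out.reverse
  | fuel + 1 =>
    if i < text.length then
      if PySem.Chars.slice lower (some (i : Int)) (some ((i : Int) + (kw.length : Int))) = kw then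
        highlightLoopB text lower kw fuel (i + kw.length)
          (pvAnsi (PySem.Chars.slice text (some (i : Int)) (some ((i : Int) + (kw.length : Int)))) :: out)
      else
        match PySem.List.pyGet? text (i : Int) with
        | some c => highlightLoopB text lower kw fuel (i + 1) ([c] :: out)
        | none => out.reverse
    else out.reverse

def highlight_bg_alt (text : String) (keyword_lower : Option String) : String :=
  match keyword_lower with
  | none => text
  | some kw =>
    if kw = "" then text
    else
      let t := text.toList
      let lower := PySem.Chars.lower t
      String.ofList (PySem.Chars.join [] (highlightLoopB t lower kw.toList (t.length + 1) 0 []))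

-- ===== PRECONDITION & SPEC =====
def Spec_highlight_bg (text : String) (keyword_lower : Option String) (out : String) : Prop := out = highlight_bg_alt text keyword_lower
instance (text : String) (keyword_lower : Option String) (out : String) : Decidable (Spec_highlight_bg text keyword_lower out) := by unfold Spec_highlight_bg; infer_instance

-- ===== CLAIM (what is proved, stated in full; the proofs are below) =====
def Claim_equal_highlight_bg : Prop := ∀ (text : String) (keyword_lower : Option String), Dom_highlight_bg text keyword_lower → Spec_highlight_bg text keyword_lower (highlight_bg text keyword_lower)

-- ===== LEMMAS AND PROOFS =====

-- "".join = flatten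
theorem pvJoinNil (ps : List (List Char)) : PySem.Chars.join [] ps = ps.flatten := by
  induction ps with
  | nil => rfl
  | cons a l ih =>
    cases l with
    | nil => simp [PySem.Chars.join, List.intercalate]
    | cons b m =>
      simp only [PySem.Chars.join, List.intercalate] at ih ⊢
      rw [List.intersperse_cons₂, List.flatten_cons, List.flatten_cons, ih]
      simp

-- find points at the unique first occurrence
theorem pvFindEq (s kw : List Char) (m : Nat) (h1 : kw <+: s.drop m)
    (h2 : ∀ i < m, ¬ kw <+: s.drop i) : PySem.Chars.find s kw = (m : Int) := by
  have hinf : kw <:+: s := h1.isInfix.trans (List.drop_suffix m s).isInfix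
  have h0 : 0 ≤ PySem.Chars.find s kw := (PySem.Chars.find_nonneg_iff s kw).2 hinf
  obtain ⟨hp, hmin⟩ := PySem.Chars.find_spec h0
  have : (PySem.Chars.find s kw).toNat = m := by
    rcases lt_trichotomy (PySem.Chars.find s kw).toNat m with h | h | h
    · exact absurd hp (h2 _ h)
    · exact h
    · exact absurd h1 (hmin _ h)
  omega

-- shifting the first occurrence one character right
theorem pvFindShift (s kw : List Char) (j : Nat) (hj : PySem.Chars.find s kw = (j : Int))
    (h1 : 1 ≤ j) : PySem.Chars.find (s.drop 1) kw = ((j - 1 : Nat) : Int) := by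
  have h0 : 0 ≤ PySem.Chars.find s kw := by omega
  obtain ⟨hp, hmin⟩ := PySem.Chars.find_spec h0
  rw [hj] at hp hmin
  simp only [Int.toNat_natCast] at hp hmin
  apply pvFindEq
  · rw [List.drop_drop]
    have : 1 + (j - 1) = j := by omega
    rw [this]; exact hp
  · intro i hi
    rw [List.drop_drop]
    exact hmin _ (by omega)

-- pure (accumulator-free) versions of the two loops, on flattened output
def pvSpecA (t low kw : List Char) : Nat → Nat → List Char
  | 0, _ => []
  | f + 1, start =>
    let F := PySem.Chars.find (low.drop start) kw
    if F = -1 then t.drop start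
    else (t.drop start).take F.toNat
        ++ pvAnsi ((t.drop (start + F.toNat)).take kw.length)
        ++ pvSpecA t low kw f (start + F.toNat + kw.length)

def pvSpecB (t low kw : List Char) : Nat → Nat → List Char
  | 0, _ => []
  | f + 1, i =>
    if i < t.length then
      if (low.drop i).take kw.length = kw then
        pvAnsi ((t.drop i).take kw.length) ++ pvSpecB t low kw f (i + kw.length)
      else (t.drop i).take 1 ++ pvSpecB t low kw f (i + 1)
    else []

-- A's loop computes pvSpecA
theorem pvLoopA (t low kw : List Char) (hkw : kw ≠ []) (hlen : low.length = t.length) :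
    ∀ (fuel start : Nat) (parts : List (List Char)), start ≤ t.length → t.length - start < fuel →
    (highlightLoopA t low kw fuel start parts).flatten
      = parts.reverse.flatten ++ pvSpecA t low kw fuel start := by
  intro fuel
  induction fuel with
  | zero => intro start parts h1 h2; omega
  | succ f ih =>
    intro start parts h1 h2
    have hsl : start ≤ low.length := by omega
    rw [highlightLoopA, pvSpecA]
    rw [PySem.Chars.findFrom_natCast low kw start hsl]
    by_cases hF : PySem.Chars.find (low.drop start) kw = -1
    · simp only [hF, reduceIte]
      simp [PySem.List.slice_from_natCast]
    · have hge : 0 ≤ PySem.Chars.find (low.drop start) kw := by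
        have := PySem.Chars.neg_one_le_find (low.drop start) kw; omega
      set j : Nat := (PySem.Chars.find (low.drop start) kw).toNat with hjdef
      have hFj : PySem.Chars.find (low.drop start) kw = (j : Int) := by omega
      have hne : ¬ ((-1 : Int) = -1 → False) → True := fun _ => trivial
      obtain ⟨hp, _⟩ := PySem.Chars.find_spec hge
      rw [hFj] at hp
      simp only [Int.toNat_natCast] at hp
      rw [List.drop_drop] at hp
      have hklen : kw.length ≤ low.length - (start + j) := by
        have := hp.length_le
        simp [List.length_drop] at this
        omega
      have hk1 : 1 ≤ kw.length := by
        cases kw with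
        | nil => exact absurd rfl hkw
        | cons a l => simp
      have hstartj : start + j + kw.length ≤ t.length := by omega
      have hcond : ¬ ((if PySem.Chars.find (low.drop start) kw = -1 then (-1 : Int)
          else (start : Int) + PySem.Chars.find (low.drop start) kw) = -1) := by
        rw [if_neg hF, hFj]; omega
      rw [if_neg hcond]
      have hidx : (if PySem.Chars.find (low.drop start) kw = -1 then (-1 : Int)
          else (start : Int) + PySem.Chars.find (low.drop start) kw) = ((start + j : Nat) : Int) := by
        rw [if_neg hF, hFj]; push_cast; ring
      rw [hidx]
      have he : (((start + j : Nat) : Int)).toNat + kw.length = start + j + kw.length := by omega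
      rw [he]
      have hslice2 : PySem.Chars.slice t (some ((start + j : Nat) : Int)) (some ((start + j + kw.length : Nat) : Int))
          = (t.drop (start + j)).take kw.length := by
        simp only [PySem.Chars.slice_eq_listSlice]
        rw [PySem.List.slice_natCast]
        congr 1
        omega
      have hrec := ih (start + j + kw.length)
        (pvAnsi ((t.drop (start + j)).take kw.length)
          :: (if (start : Int) < ((start + j : Nat) : Int)
              then PySem.Chars.slice t (some (start : Int)) (some ((start + j : Nat) : Int)) :: parts else parts))
        hstartj (by omega)
      simp only [hslice2] at hrec ⊢
      rw [hrec, if_neg hF]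
      by_cases hj0 : 0 < j
      · rw [if_pos (by exact_mod_cast by omega)]
        have hslice1 : PySem.Chars.slice t (some (start : Int)) (some ((start + j : Nat) : Int))
            = (t.drop start).take j := by
          simp only [PySem.Chars.slice_eq_listSlice]
          rw [PySem.List.slice_natCast]
          congr 1
          omega
        rw [hslice1]
        simp
      · have hj : j = 0 := by omega
        rw [if_neg (by exact_mod_cast by omega)]
        simp [hj]

-- B's loop computes pvSpecB
theorem pvLoopB (t low kw : List Char) (hkw : kw ≠ []) (hlen : low.length = t.length) :
    ∀ (fuel i : Nat) (out : List (List Char)), i ≤ t.length → t.length - i < fuel →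
    (highlightLoopB t low kw fuel i out).flatten
      = out.reverse.flatten ++ pvSpecB t low kw fuel i := by
  intro fuel
  have hk1 : 1 ≤ kw.length := by
    cases kw with
    | nil => exact absurd rfl hkw
    | cons a l => simp
  induction fuel with
  | zero => intro i out h1 h2; omega
  | succ f ih =>
    intro i out h1 h2
    rw [highlightLoopB, pvSpecB]
    by_cases hin : i < t.length
    · rw [if_pos hin, if_pos hin]
      have hcast : ((i : Int) + (kw.length : Int)) = ((i + kw.length : Nat) : Int) := by push_cast; ring
      have hsliceL : PySem.Chars.slice low (some (i : Int)) (some ((i : Int) + (kw.length : Int)))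
          = (low.drop i).take kw.length := by
        simp only [PySem.Chars.slice_eq_listSlice]
        rw [hcast, PySem.List.slice_natCast]
        congr 1
        omega
      have hsliceT : PySem.Chars.slice t (some (i : Int)) (some ((i : Int) + (kw.length : Int)))
          = (t.drop i).take kw.length := by
        simp only [PySem.Chars.slice_eq_listSlice]
        rw [hcast, PySem.List.slice_natCast]
        congr 1
        omega
      rw [hsliceL, hsliceT]
      by_cases hm : (low.drop i).take kw.length = kw
      · rw [if_pos hm, if_pos hm]
        have hik : i + kw.length ≤ t.length := by
          have : ((low.drop i).take kw.length).length = kw.length := by rw [hm]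
          simp [List.length_take, List.length_drop] at this
          omega
        rw [ih (i + kw.length) _ hik (by omega)]
        simp
      · rw [if_neg hm, if_neg hm]
        have hget : PySem.List.pyGet? t (i : Int) = some t[i] := by
          rw [PySem.List.pyGet?_natCast]
          exact List.getElem?_eq_getElem hin
        rw [hget]
        rw [ih (i + 1) _ (by omega) (by omega)]
        have htake1 : (t.drop i).take 1 = [t[i]] := by
          rw [List.drop_eq_getElem_cons hin, List.take_succ_cons, List.take_zero]
        rw [htake1]
        simp
    · rw [if_neg hin, if_neg hin]
      simp

-- when kw does not occur from i on, B copies the rest verbatim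
theorem pvSpecBNone (t low kw : List Char) :
    ∀ (fuel i : Nat), i ≤ t.length → t.length - i < fuel → ¬ kw <:+: low.drop i →
    pvSpecB t low kw fuel i = t.drop i := by
  intro fuel
  induction fuel with
  | zero => intro i h1 h2 h3; omega
  | succ f ih =>
    intro i h1 h2 h3
    rw [pvSpecB]
    by_cases hin : i < t.length
    · rw [if_pos hin]
      have hm : ¬ (low.drop i).take kw.length = kw := by
        intro hm
        exact h3 (List.IsPrefix.isInfix (List.prefix_iff_eq_take.2 (by rw [hm])))
      rw [if_neg hm]
      have hnext : ¬ kw <:+: low.drop (i + 1) := by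
        intro h
        exact h3 (h.trans (by
          have : low.drop (i + 1) = (low.drop i).drop 1 := by rw [List.drop_drop]
          rw [this]
          exact (List.drop_suffix 1 (low.drop i)).isInfix))
      rw [ih (i + 1) (by omega) (by omega) hnext]
      rw [List.drop_eq_getElem_cons hin]
      simp
    · rw [if_neg hin]
      have : t.length ≤ i := by omega
      simp [List.drop_eq_nil_of_le this]

-- the two pure loops agree
theorem pvSpecAB (t low kw : List Char) (hkw : kw ≠ []) (hlen : low.length = t.length) :
    ∀ (d start fa fb : Nat), t.length - start ≤ d → start ≤ t.length →
      t.length - start < fa → t.length - start < fb →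
      pvSpecA t low kw fa start = pvSpecB t low kw fb start := by
  have hk1 : 1 ≤ kw.length := by
    cases kw with
    | nil => exact absurd rfl hkw
    | cons a l => simp
  intro d
  induction d with
  | zero =>
    intro start fa fb hd h1 hfa hfb
    have hstart : start = t.length := by omega
    obtain ⟨fa', rfl⟩ : ∃ fa', fa = fa' + 1 := ⟨fa - 1, by omega⟩
    obtain ⟨fb', rfl⟩ : ∃ fb', fb = fb' + 1 := ⟨fb - 1, by omega⟩
    rw [pvSpecA, pvSpecB]
    have hdrop : low.drop start = [] := List.drop_eq_nil_of_le (by omega)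
    have hF : PySem.Chars.find (low.drop start) kw = -1 := by
      rw [PySem.Chars.find_eq_neg_one_iff, hdrop]
      intro h
      exact hkw (List.eq_nil_of_infix_nil h)
    simp only [hF, reduceIte]
    rw [if_neg (by omega), List.drop_eq_nil_of_le (by omega)]
  | succ d ihd =>
    intro start fa fb hd h1 hfa hfb
    by_cases hend : start = t.length
    · subst hend
      obtain ⟨fa', rfl⟩ : ∃ fa', fa = fa' + 1 := ⟨fa - 1, by omega⟩
      obtain ⟨fb', rfl⟩ : ∃ fb', fb = fb' + 1 := ⟨fb - 1, by omega⟩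
      rw [pvSpecA, pvSpecB]
      have hdrop : low.drop t.length = [] := List.drop_eq_nil_of_le (by omega)
      have hF : PySem.Chars.find (low.drop t.length) kw = -1 := by
        rw [PySem.Chars.find_eq_neg_one_iff, hdrop]
        intro h
        exact hkw (List.eq_nil_of_infix_nil h)
      simp only [hF, reduceIte]
      rw [if_neg (by omega), List.drop_eq_nil_of_le (by omega)]
    · have hlt : start < t.length := by omega
      obtain ⟨fa', rfl⟩ : ∃ fa', fa = fa' + 1 := ⟨fa - 1, by omega⟩
      obtain ⟨fb', rfl⟩ : ∃ fb', fb = fb' + 1 := ⟨fb - 1, by omega⟩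
      by_cases hF : PySem.Chars.find (low.drop start) kw = -1
      · rw [pvSpecA]
        simp only [hF, reduceIte]
        rw [pvSpecBNone t low kw (fb' + 1) start h1 hfb
          ((PySem.Chars.find_eq_neg_one_iff _ _).1 hF)]
      · have hge : 0 ≤ PySem.Chars.find (low.drop start) kw := by
          have := PySem.Chars.neg_one_le_find (low.drop start) kw; omega
        set j : Nat := (PySem.Chars.find (low.drop start) kw).toNat with hjdef
        have hFj : PySem.Chars.find (low.drop start) kw = (j : Int) := by omega
        obtain ⟨hp, hmin⟩ := PySem.Chars.find_spec hge
        rw [hFj] at hp hmin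
        simp only [Int.toNat_natCast] at hp hmin
        have hklen : kw.length ≤ (low.drop start).length - j := by
          have := hp.length_le
          simp [List.length_drop] at this ⊢
          omega
        by_cases hj0 : j = 0
        · -- match at the cursor: both emit the highlighted keyword and jump k ahead
          rw [hj0] at hFj hp hklen
          rw [List.drop_drop] at hp
          simp only [Nat.add_zero] at hp
          have hpm : (low.drop start).take kw.length = kw := (List.prefix_iff_eq_take.1 hp).symm
          have hik : start + kw.length ≤ t.length := by
            simp [List.length_drop] at hklen
            omega
          rw [pvSpecA, pvSpecB]
          simp only [hFj, Nat.cast_zero, Int.toNat_zero, Nat.add_zero, List.take_zero, List.nil_append]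
          rw [if_pos hlt, if_pos hpm,
            ihd (start + kw.length) fa' fb' (by omega) (by omega) (by omega) (by omega)]
          simp
        · -- no match at the cursor: both emit text[start] and step one ahead
          have hj1 : 1 ≤ j := by omega
          have hnm : ¬ (low.drop start).take kw.length = kw := by
            intro hm
            exact (hmin 0 (by omega)) (by
              simpa using List.prefix_iff_eq_take.2 (by rw [hm]))
          have hshift : PySem.Chars.find (low.drop (start + 1)) kw = ((j - 1 : Nat) : Int) := by
            have := pvFindShift (low.drop start) kw j hFj hj1
            rwa [List.drop_drop] at this
          -- expand A one character
          have hAstep : pvSpecA t low kw (fa' + 1) start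
              = t[start] :: pvSpecA t low kw (fa' + 1) (start + 1) := by
            conv_lhs => rw [pvSpecA]
            conv_rhs => rw [pvSpecA]
            simp only [hFj, hshift]
            rw [if_neg (by omega), if_neg (by simp)]
            simp only [Int.toNat_natCast]
            rw [List.drop_eq_getElem_cons hlt, show j = (j - 1) + 1 from by omega,
              List.take_succ_cons]
            simp
            have e1 : start + (j - 1 + 1) = start + 1 + (j - 1) := by omega
            rw [e1]
          rw [hAstep, pvSpecB, if_pos hlt, if_neg hnm]
          rw [ihd (start + 1) (fa' + 1) fb' (by omega) (by omega) (by omega) (by omega)]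
          rw [show List.take 1 (List.drop start t) = [t[start]] from by
            rw [List.drop_eq_getElem_cons hlt, List.take_succ_cons, List.take_zero]]
          rfl

-- ===== VERDICT (by name: the statement is the Claim_ definition above) =====
theorem highlight_bg_spec : Claim_equal_highlight_bg := by
  intro text keyword_lower _
  unfold Spec_highlight_bg
  cases keyword_lower with
  | none => rfl
  | some kw =>
    by_cases hkw : kw = ""
    · simp [highlight_bg, highlight_bg_alt, hkw]
    · simp only [highlight_bg, highlight_bg_alt, if_neg hkw]
      have hkwl : kw.toList ≠ [] := by
        intro h
        exact hkw (by
          have h2 := congrArg String.ofList h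
          simpa using h2)
      have hlen : (PySem.Chars.lower text.toList).length = text.toList.length := by
        simp [PySem.Chars.lower]
      congr 1
      rw [pvJoinNil, pvJoinNil]
      rw [pvLoopA text.toList (PySem.Chars.lower text.toList) kw.toList hkwl hlen
            (text.toList.length + 1) 0 [] (by omega) (by omega),
          pvLoopB text.toList (PySem.Chars.lower text.toList) kw.toList hkwl hlen
            (text.toList.length + 1) 0 [] (by omega) (by omega)]
      simp only [List.reverse_nil, List.flatten_nil, List.nil_append]
      exact pvSpecAB text.toList (PySem.Chars.lower text.toList) kw.toList hkwl hlen
        text.toList.length 0 (text.toList.length + 1) (text.toList.length + 1)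
        (by omega) (by omega) (by omega) (by omega)
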